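-- pv_equiv track=rewrite | github.com/boaznahum/cubesolve | src/cube/domain/solver/_2x2/ida_star_tables.py | co_from_twist
-- ===== SOURCE A (Python) =====
-- def co_from_twist(twist: int) -> list[int]:
--     """Recover corner orientations from twist coordinate."""
--     co: list[int] = [0] * 8
--     total: int = 0
--     for i in range(5, -1, -1):
--         co[i] = twist % 3
--         total += co[i]
--         twist //= 3
--     co[6] = (3 - total % 3) % 3
--     co[7] = 0  # DBL fixed
--     return co
-- ===== SOURCE B (Python) =====
-- def _build_table():
--     """All 729 orientation rows, enumerated once by a base-3 odometer (no division)."""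
--     table = []
--     row = [0] * 6
--     for _ in range(729):
--         table.append(row + [(-sum(row)) % 3, 0])
--         row = row[:]
--         i = 5
--         while i >= 0 and row[i] == 2:
--             row[i] = 0
--             i -= 1
--         if i >= 0:
--             row[i] += 1
--     return table
--
-- _CO_TABLE = _build_table()
--
-- def co_from_twist(twist: int) -> list[int]:
--     """Recover corner orientations from twist coordinate."""
--     return list(_CO_TABLE[twist % 729])
-- ===== Notes on version B (the rewrite author's own statement) =====
-- stated objective: alternative
-- what changed: B precomputes all 729 orientation rows once with a base-3 odometer (increment-with-carry, no division) and answers each call by a single table lookup at twist % 729, instead of A's per-call loop of six divmod steps threading a running quotient and total.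
import Mathlib
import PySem

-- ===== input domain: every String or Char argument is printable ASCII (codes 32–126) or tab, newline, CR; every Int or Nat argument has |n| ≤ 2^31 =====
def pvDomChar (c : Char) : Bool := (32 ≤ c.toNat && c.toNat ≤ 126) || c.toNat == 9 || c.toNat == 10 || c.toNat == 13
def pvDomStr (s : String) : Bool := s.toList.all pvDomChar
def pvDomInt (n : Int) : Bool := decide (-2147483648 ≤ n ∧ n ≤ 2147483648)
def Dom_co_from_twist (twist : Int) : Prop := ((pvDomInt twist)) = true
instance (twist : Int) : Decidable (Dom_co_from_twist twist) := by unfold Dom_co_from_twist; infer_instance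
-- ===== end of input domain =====

-- B replaces A's per-call divmod loop by a table of all 729 orientation rows built once
-- with a base-3 odometer (increment-with-carry), each call being one lookup at twist % 729
-- (alternative algorithm; no speed claim).

-- ===== PORT A =====
-- literal port: co = [0]*8; for i in range(5,-1,-1): co[i] = twist % 3; total += co[i]; twist //= 3
def co_from_twist (twist : Int) : List Int :=
  let co : List Int := List.replicate 8 0
  let s := (PySem.List.pyRange 5 (-1) (-1)).foldl
    (fun (st : List Int × Int × Int) i =>
      let d := PySem.Int.mod st.2.2 3
      (PySem.List.pySetD st.1 i d, st.2.1 + d, PySem.Int.floordiv st.2.2 3))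
    (co, 0, twist)
  let co2 := PySem.List.pySetD s.1 6 (PySem.Int.mod (3 - PySem.Int.mod s.2.1 3) 3)
  PySem.List.pySetD co2 7 0

-- ===== PORT B =====
-- literal port of Source B's odometer: i = 5; while i >= 0 and row[i] == 2: row[i] = 0; i -= 1;
-- if i >= 0: row[i] += 1   (recursion on j = i + 1; j = 0 is the i < 0 exit with no increment)
def pvIncrGo (row : List Int) : Nat → List Int
  | 0 => row
  | j + 1 =>
    if PySem.List.pyGetD row (j : Int) 0 = 2 then pvIncrGo (PySem.List.pySetD row (j : Int) 0) j
    else PySem.List.pySetD row (j : Int) (PySem.List.pyGetD row (j : Int) 0 + 1)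

-- _build_table(): for _ in range(729): table.append(row + [(-sum(row)) % 3, 0]); row = incr(row)
def pvCoTable : List (List Int) :=
  ((PySem.List.pyRange 0 729 1).foldl
    (fun (st : List (List Int) × List Int) _ =>
      (st.1 ++ [st.2 ++ [PySem.Int.mod (-(st.2.sum)) 3, 0]], pvIncrGo st.2 6))
    ([], List.replicate 6 0)).1

-- return list(_CO_TABLE[twist % 729])  (index is in [0, 729), so the [] default is never used)
def co_from_twist_alt (twist : Int) : List Int :=
  PySem.List.pyGetD pvCoTable (PySem.Int.mod twist 729) []

-- ===== PRECONDITION & SPEC =====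
def Spec_co_from_twist (twist : Int) (out : List Int) : Prop := out = co_from_twist_alt twist
instance (twist : Int) (out : List Int) : Decidable (Spec_co_from_twist twist out) := by unfold Spec_co_from_twist; infer_instance

-- ===== CLAIM (what is proved, stated in full; the proofs are below) =====
def Claim_equal_co_from_twist : Prop := ∀ (twist : Int), Dom_co_from_twist twist → Spec_co_from_twist twist (co_from_twist twist)

-- ===== LEMMAS AND PROOFS =====

-- the six base-3 digits of n, most significant first, and the full row the table stores
def pvDigits (n : Nat) : List Int :=
  [((n : Int) / 243) % 3, ((n : Int) / 81) % 3, ((n : Int) / 27) % 3,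
   ((n : Int) / 9) % 3, ((n : Int) / 3) % 3, (n : Int) % 3]

def pvRow (n : Nat) : List Int :=
  pvDigits n ++ [PySem.Int.mod (-(pvDigits n).sum) 3, 0]

-- the odometer increment is the base-3 successor on the digit rows
set_option maxRecDepth 10000 in
theorem pvOdo : ∀ n : Fin 729, pvIncrGo (pvDigits n.val) 6 = pvDigits (n.val + 1) := by decide

theorem pvFold : ∀ k : Nat, k ≤ 729 →
    (PySem.List.pyRange 0 (k : Int) 1).foldl
      (fun (st : List (List Int) × List Int) _ =>
        (st.1 ++ [st.2 ++ [PySem.Int.mod (-(st.2.sum)) 3, 0]], pvIncrGo st.2 6))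
      ([], List.replicate 6 0)
    = ((List.range k).map pvRow, pvDigits k) := by
  intro k
  induction k with
  | zero => intro _; decide
  | succ k ih =>
    intro hk
    rw [show ((k + 1 : Nat) : Int) = (k : Int) + 1 by push_cast; ring,
        PySem.List.pyRange_one_succ_right (by exact_mod_cast Nat.zero_le k),
        List.foldl_append, ih (by omega)]
    simp only [List.foldl]
    rw [Prod.mk.injEq]
    refine ⟨?_, ?_⟩
    · rw [List.range_succ, List.map_append]; rfl
    · exact pvOdo ⟨k, by omega⟩

theorem pvTable : pvCoTable = (List.range 729).map pvRow := by
  have h := pvFold 729 (by omega)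
  unfold pvCoTable
  rw [show ((729 : Nat) : Int) = (729 : Int) by norm_num] at h
  rw [h]

-- List.set on an 8-element literal list, one rfl lemma per index used
theorem pvSet0 (a b c d e f g h v : Int) : List.set [a,b,c,d,e,f,g,h] 0 v = [v,b,c,d,e,f,g,h] := rfl
theorem pvSet1 (a b c d e f g h v : Int) : List.set [a,b,c,d,e,f,g,h] 1 v = [a,v,c,d,e,f,g,h] := rfl
theorem pvSet2 (a b c d e f g h v : Int) : List.set [a,b,c,d,e,f,g,h] 2 v = [a,b,v,d,e,f,g,h] := rfl
theorem pvSet3 (a b c d e f g h v : Int) : List.set [a,b,c,d,e,f,g,h] 3 v = [a,b,c,v,e,f,g,h] := rfl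
theorem pvSet4 (a b c d e f g h v : Int) : List.set [a,b,c,d,e,f,g,h] 4 v = [a,b,c,d,v,f,g,h] := rfl
theorem pvSet5 (a b c d e f g h v : Int) : List.set [a,b,c,d,e,f,g,h] 5 v = [a,b,c,d,e,v,g,h] := rfl
theorem pvSet6 (a b c d e f g h v : Int) : List.set [a,b,c,d,e,f,g,h] 6 v = [a,b,c,d,e,f,v,h] := rfl
theorem pvSet7 (a b c d e f g h v : Int) : List.set [a,b,c,d,e,f,g,h] 7 v = [a,b,c,d,e,f,g,v] := rfl

-- ===== VERDICT (by name: the statement is the Claim_ definition above) =====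
theorem co_from_twist_spec : Claim_equal_co_from_twist := by
  intro twist _
  show _ = _
  -- reduce B's side to the explicit row of twist % 729
  have hmod : PySem.Int.mod twist 729 = twist % 729 :=
    PySem.Int.mod_eq_emod_of_pos (by omega)
  have hbound : 0 ≤ twist % 729 ∧ twist % 729 < 729 := ⟨Int.emod_nonneg _ (by omega), Int.emod_lt_of_pos _ (by omega)⟩
  set e : Nat := (twist % 729).toNat with he
  have hecast : ((e : Nat) : Int) = twist % 729 := by omega
  have helt : e < 729 := by omega
  have hB : co_from_twist_alt twist = pvRow e := by
    unfold co_from_twist_alt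
    rw [hmod, pvTable, ← hecast, PySem.List.pyGetD_natCast,
        PySem.List.getD_map_range pvRow 729 e [] helt]
  rw [hB]
  -- reduce A's side to an explicit list and compare componentwise
  unfold co_from_twist
  have h5 : PySem.List.pyRange 5 (-1) (-1) = [5, 4, 3, 2, 1, 0] := by decide
  simp only [h5, List.foldl, List.replicate]
  norm_num [PySem.List.pySetD_of_nonneg, List.set]
  simp only [show Int.toNat 2 = 2 from rfl, show Int.toNat 3 = 3 from rfl,
    show Int.toNat 4 = 4 from rfl, show Int.toNat 5 = 5 from rfl,
    show Int.toNat 6 = 6 from rfl, show Int.toNat 7 = 7 from rfl]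
  simp only [pvSet0, pvSet1, pvSet2, pvSet3, pvSet4, pvSet5, pvSet6, pvSet7]
  simp only [pvRow, pvDigits, List.sum_cons, List.sum_nil, List.cons_append, List.nil_append,
    PySem.Int.mod_eq_emod_of_pos (show (0:Int) < 3 by omega)]
  have hd2 : twist / 3 / 3 = twist / 9 := by omega
  have hd3 : twist / 9 / 3 = twist / 27 := by omega
  have hd4 : twist / 27 / 3 = twist / 81 := by omega
  have hd5 : twist / 81 / 3 = twist / 243 := by omega
  rw [hd2, hd3, hd4, hd5]
  simp only [List.cons.injEq, and_true]
  refine ⟨?_, ?_, ?_, ?_, ?_, ?_, ?_⟩ <;> omega
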